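-- pv_equiv track=rewrite | github.com/sunsu2737/algorithm | VSP/랜섬웨어검사.py | solution
-- ===== SOURCE A (Python) =====
-- def solution(data, virus, k):
--     answer = 0
--     for i in range(len(data)-len(virus)+1):
--         temp = 0
--         for j in range(len(virus)):
--             if data[i+j] != virus[j]:
--                 temp+=1
--         if temp<=k:
--             answer+=1
--
--
--     return answer
-- ===== SOURCE B (Python) =====
-- def solution(data, virus, k):
--     n, m = len(data), len(virus)
--     span = n - m + 1
--     if span <= 0:
--         return 0
--     pos = {}
--     for j, c in enumerate(virus):
--         pos.setdefault(c, []).append(j)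
--     matches = [0] * span
--     for p in range(n):
--         js = pos.get(data[p], [])
--         lo, hi = 0, len(js)
--         while lo < hi:  # binary search: first index whose position exceeds p - span
--             mid = (lo + hi) // 2
--             if js[mid] <= p - span:
--                 lo = mid + 1
--             else:
--                 hi = mid
--         while lo < len(js) and js[lo] <= p:
--             matches[p - js[lo]] += 1
--             lo += 1
--     return sum(1 for t in matches if m - t <= k)
-- ===== Notes on version B (the rewrite author's own statement) =====
-- stated objective: alternative
-- what changed: B replaces A's per-offset scan of the whole virus by an inverted, index-based algorithm: it builds a char->sorted-position index of the virus once, then in a single pass over data binary-searches each character's position list for the entries inside the current offset window and scatters them into a per-offset match counter, finally counting offsets whose mismatch count len(virus)-matches[i] is at most k.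
import Mathlib
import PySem

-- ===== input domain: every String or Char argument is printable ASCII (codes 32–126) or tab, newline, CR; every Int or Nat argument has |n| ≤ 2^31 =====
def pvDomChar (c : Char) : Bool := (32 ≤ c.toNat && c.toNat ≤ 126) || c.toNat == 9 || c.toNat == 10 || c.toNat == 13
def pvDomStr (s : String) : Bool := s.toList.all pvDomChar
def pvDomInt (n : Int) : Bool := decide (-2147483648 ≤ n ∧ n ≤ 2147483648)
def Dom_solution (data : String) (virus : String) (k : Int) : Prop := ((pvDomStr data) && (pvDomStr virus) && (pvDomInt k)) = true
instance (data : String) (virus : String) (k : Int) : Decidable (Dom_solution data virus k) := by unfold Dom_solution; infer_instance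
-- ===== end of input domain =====

-- B indexes the virus by character once, then makes one pass over data: a hand-written
-- binary search selects, on the sorted position list of the current character, the
-- positions inside the offset window, and each is scattered into a per-offset match
-- counter; finally it counts offsets whose mismatch count is at most k.

-- ===== PORT A =====
def solution (data : String) (virus : String) (k : Int) : Int :=
  let d := data.toList
  let v := virus.toList
  (PySem.List.pyRange 0 ((d.length : Int) - (v.length : Int) + 1) 1).foldl
    (fun answer i =>
      let temp := (PySem.List.pyRange 0 (v.length : Int) 1).foldl
        (fun temp j =>
          if PySem.List.pyGet? d (i + j) ≠ PySem.List.pyGet? v j then temp + 1 else temp)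
        (0 : Int)
      if temp ≤ k then answer + 1 else answer)
    0

-- ===== PORT B =====
-- B-side helpers: transliterations of B's dict-building loop and its two while loops.
def pvPos (v : List Char) : PySem.Dict Char (List Int) :=
  (PySem.List.enumerate v).foldl (fun dd jc => dd.modify jc.2 [] (· ++ [jc.1])) PySem.Dict.empty
def pvBisect (js : List Int) (target : Int) (lo hi : Int) : Int :=
  if h : lo < hi then
    let mid := PySem.Int.floordiv (lo + hi) 2
    if PySem.List.pyGetD js mid 0 ≤ target then pvBisect js target (mid + 1) hi
    else pvBisect js target lo mid
  else lo
termination_by (hi - lo).toNat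
decreasing_by
  · have hb := PySem.Int.floordiv_two_mid_bounds (le_of_lt h)
    have : PySem.Int.floordiv (lo + hi) 2 < hi := by
      rw [PySem.Int.floordiv_lt_iff_lt_mul (by norm_num)]
      omega
    omega
  · have : PySem.Int.floordiv (lo + hi) 2 < hi := by
      rw [PySem.Int.floordiv_lt_iff_lt_mul (by norm_num)]
      omega
    omega

def pvEmit (js : List Int) (p : Int) (lo : Int) (ms : List Int) : List Int :=
  if h : lo < (js.length : Int) ∧ PySem.List.pyGetD js lo 0 ≤ p then
    pvEmit js p (lo + 1)
      (PySem.List.pySetD ms (p - PySem.List.pyGetD js lo 0)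
        (PySem.List.pyGetD ms (p - PySem.List.pyGetD js lo 0) 0 + 1))
  else ms
termination_by ((js.length : Int) - lo).toNat
decreasing_by omega


def solution_alt (data : String) (virus : String) (k : Int) : Int :=
  let d := data.toList
  let v := virus.toList
  let n : Int := d.length
  let m : Int := v.length
  let span : Int := n - m + 1
  if span ≤ 0 then 0
  else
    let pos : PySem.Dict Char (List Int) := pvPos v
    let ms : List Int :=
      (PySem.List.pyRange 0 n 1).foldl
        (fun ms p =>
          let js := pos.getD (PySem.List.pyGetD d p ' ') []
          let lo := pvBisect js (p - span) 0 (js.length : Int)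
          pvEmit js p lo ms)
        (List.replicate span.toNat (0 : Int))
    ms.foldl (fun acc t => if m - t ≤ k then acc + 1 else acc) 0

-- ===== PRECONDITION & SPEC =====
def Spec_solution (data : String) (virus : String) (k : Int) (out : Int) : Prop := out = solution_alt data virus k
instance (data : String) (virus : String) (k : Int) (out : Int) : Decidable (Spec_solution data virus k out) := by unfold Spec_solution; infer_instance

-- ===== CLAIM (what is proved, stated in full; the proofs are below) =====
def Claim_equal_solution : Prop := ∀ (data : String) (virus : String) (k : Int), Dom_solution data virus k → Spec_solution data virus k (solution data virus k)

-- ===== LEMMAS AND PROOFS =====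

-- number of mismatching aligned positions
def pvMism (s v : List Char) : Nat := (s.zip v).countP (fun p => decide (p.1 ≠ p.2))

-- number of matching aligned positions of the window at offset t
def pvMCnt (d v : List Char) (t : Nat) : Nat :=
  (List.range v.length).countP (fun j => decide (d[t + j]? = v[j]?))

theorem pvCountP_range_succ (f : Nat → Bool) (n : Nat) :
    (List.range (n + 1)).countP f
      = (if f 0 then 1 else 0) + (List.range n).countP (fun j => f (j + 1)) := by
  rw [List.range_succ_eq_map, List.countP_cons, List.countP_map]
  simp only [Function.comp_def]
  by_cases h : f 0 <;> simp [h] <;> omega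

theorem pvMism_eq_countP_range (v s : List Char) (h : v.length ≤ s.length) :
    pvMism s v = (List.range v.length).countP (fun j => decide (s[j]? ≠ v[j]?)) := by
  induction v generalizing s with
  | nil => simp [pvMism]
  | cons b v ih =>
    cases s with
    | nil => simp at h
    | cons a s =>
      have hlen : v.length ≤ s.length := by simpa using h
      rw [List.length_cons, pvCountP_range_succ]
      have h0 : (decide (((a :: s)[0]? : Option Char) ≠ (b :: v)[0]?)) = decide (a ≠ b) := by
        simp
      have hsucc : (fun j => decide (((a :: s)[j + 1]? : Option Char) ≠ (b :: v)[j + 1]?))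
          = (fun j => decide ((s[j]? : Option Char) ≠ v[j]?)) := by
        funext j; simp
      rw [h0, hsucc, ← ih s hlen]
      simp only [pvMism, List.zip_cons_cons, List.countP_cons, decide_eq_true_eq]
      by_cases hab : a = b <;> simp [hab] <;> omega

-- A's value is the count of offsets within distance k
theorem solution_eq_count (data virus : String) (k : Int) :
    solution data virus k =
      (((List.range ((data.toList.length : Int) - (virus.toList.length : Int) + 1).toNat).countP
        (fun c => decide ((pvMism (data.toList.drop c) virus.toList : Int) ≤ k))) : Int) := by
  unfold solution
  rw [PySem.List.foldl_ite_add_one, zero_add]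
  have hstep : ∀ i : Int, 0 ≤ i → i + (virus.toList.length : Int) ≤ (data.toList.length : Int) →
      ((PySem.List.pyRange 0 (virus.toList.length : Int) 1).foldl
        (fun temp j =>
          if PySem.List.pyGet? data.toList (i + j) ≠ PySem.List.pyGet? virus.toList j
          then temp + 1 else temp) (0 : Int))
      = (pvMism (data.toList.drop i.toNat) virus.toList : Int) := by
    intro i h0 hm
    rw [PySem.List.foldl_ite_add_one, PySem.List.pyRange_one, List.countP_map, zero_add, sub_zero,
      Int.toNat_natCast]
    rw [pvMism_eq_countP_range virus.toList (data.toList.drop i.toNat)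
      (by simp only [List.length_drop]; omega)]
    congr 1
    apply List.countP_congr
    intro j hj
    simp only [List.mem_range] at hj
    simp only [Function.comp_def]
    have h2 : (0 : Int) + (j : Int) = ((j : Nat) : Int) := by ring
    have h1 : i + ((0 : Int) + (j : Int)) = ((i.toNat + j : Nat) : Int) := by omega
    rw [h1, h2, PySem.List.pyGet?_natCast, PySem.List.pyGet?_natCast]
    simp [List.getElem?_drop]
  have hmain : List.countP
      (fun i => decide ((PySem.List.pyRange 0 (virus.toList.length : Int) 1).foldl
          (fun temp j =>
            if PySem.List.pyGet? data.toList (i + j) ≠ PySem.List.pyGet? virus.toList j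
            then temp + 1 else temp) (0 : Int) ≤ k))
      (PySem.List.pyRange 0 ((data.toList.length : Int) - (virus.toList.length : Int) + 1) 1)
      = List.countP
        (fun i => decide ((pvMism (data.toList.drop i.toNat) virus.toList : Int) ≤ k))
        (PySem.List.pyRange 0 ((data.toList.length : Int) - (virus.toList.length : Int) + 1) 1) := by
    apply List.countP_congr
    intro i hi
    rw [PySem.List.mem_pyRange_one] at hi
    rw [hstep i hi.1 (by omega)]
  rw [hmain, PySem.List.pyRange_one, List.countP_map, sub_zero]
  congr 1
  apply List.countP_congr
  intro c hc
  simp only [Function.comp_def]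
  rw [show ((0 : Int) + (c : Int)).toNat = c by omega]

theorem pvPos_getD (v : List Char) (c : Char) :
    (pvPos v).getD c []
      = ((PySem.List.enumerate v).filter (fun jc => jc.2 == c)).map (·.1) := by
  have h : pvPos v
      = ((PySem.List.enumerate v).map (fun jc => (jc.2, jc.1))).foldl
          (fun dd p => dd.modify p.1 [] (· ++ [p.2])) PySem.Dict.empty := by
    rw [List.foldl_map]; rfl
  rw [h, PySem.Dict.getD_foldl_modify_append]
  simp [List.filter_map, List.map_map, Function.comp_def]


theorem pvBisect_spec (js : List Int) (target : Int)
    (hs : js.Pairwise (· < ·)) :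
    ∀ (lo hi : Int), 0 ≤ lo → lo ≤ hi → hi ≤ (js.length : Int) →
    (∀ q : Nat, (q : Int) < lo → q < js.length → js.getD q 0 ≤ target) →
    (∀ q : Nat, hi ≤ (q : Int) → q < js.length → target < js.getD q 0) →
    0 ≤ pvBisect js target lo hi ∧ pvBisect js target lo hi ≤ (js.length : Int) ∧
    (∀ q : Nat, (q : Int) < pvBisect js target lo hi → q < js.length → js.getD q 0 ≤ target) ∧
    (∀ q : Nat, pvBisect js target lo hi ≤ (q : Int) → q < js.length → target < js.getD q 0) := by
  intro lo hi
  induction lo, hi using pvBisect.induct js target with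
  | case1 lo hi h mid hle ih =>
    intro h0 hlh hhl hpre hpost
    rw [pvBisect, dif_pos h, if_pos hle]
    have hb := PySem.Int.floordiv_two_mid_bounds (le_of_lt h)
    have hmidlt : mid < hi := by
      rw [show mid = PySem.Int.floordiv (lo + hi) 2 from rfl,
        PySem.Int.floordiv_lt_iff_lt_mul (by norm_num)]
      omega
    apply ih (by omega) (by omega) (by omega)
    · intro q hq hql
      -- q < mid + 1 : js[q] ≤ js[mid] ≤ target by sortedness
      rcases Nat.lt_or_ge q mid.toNat with hcase | hcase
      · have hmidl : mid.toNat < js.length := by omega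
        have := (List.pairwise_iff_getElem.mp hs) q mid.toNat (by omega) hmidl hcase
        have hmg : js.getD mid.toNat 0 ≤ target := by
          rw [PySem.List.pyGetD_of_nonneg js 0 (by omega)] at hle
          exact hle
        rw [List.getD_eq_getElem _ _ hql]
        rw [List.getD_eq_getElem _ _ hmidl] at hmg
        omega
      · have hqm : q = mid.toNat := by omega
        subst hqm
        rw [PySem.List.pyGetD_of_nonneg js 0 (by omega)] at hle
        exact hle
    · exact hpost
  | case2 lo hi h mid hle ih =>
    intro h0 hlh hhl hpre hpost
    rw [pvBisect, dif_pos h, if_neg hle]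
    have hb := PySem.Int.floordiv_two_mid_bounds (le_of_lt h)
    have hmidlt : mid < hi := by
      rw [show mid = PySem.Int.floordiv (lo + hi) 2 from rfl,
        PySem.Int.floordiv_lt_iff_lt_mul (by norm_num)]
      omega
    apply ih h0 (by omega) (by omega) hpre
    intro q hq hql
    rw [not_le] at hle
    rcases Nat.lt_or_ge mid.toNat q with hcase | hcase
    · have hmidl : mid.toNat < js.length := by omega
      have := (List.pairwise_iff_getElem.mp hs) mid.toNat q hmidl hql hcase
      rw [PySem.List.pyGetD_of_nonneg js 0 (by omega)] at hle
      rw [List.getD_eq_getElem _ _ hql]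
      rw [List.getD_eq_getElem _ _ hmidl] at hle
      omega
    · have hqm : q = mid.toNat := by omega
      subst hqm
      rw [PySem.List.pyGetD_of_nonneg js 0 (by omega)] at hle
      exact hle
  | case3 lo hi h =>
    intro h0 hlh hhl hpre hpost
    rw [pvBisect, dif_neg h]
    exact ⟨h0, by omega, hpre, fun q hq hql => hpost q (by omega) hql⟩

theorem pvEmit_length (js : List Int) (p : Int) :
    ∀ (lo : Int) (ms : List Int), (pvEmit js p lo ms).length = ms.length := by
  intro lo ms
  induction lo, ms using pvEmit.induct js p with
  | case1 lo ms h ih =>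
    rw [pvEmit, dif_pos h]
    rw [ih, PySem.List.length_pySetD]
  | case2 lo ms h =>
    rw [pvEmit, dif_neg h]

theorem pvEmit_getD (js : List Int) (p : Int) (t : Nat)
    (hs : js.Pairwise (· < ·)) :
    ∀ (lo : Int) (ms : List Int), 0 ≤ lo → t < ms.length →
    (pvEmit js p lo ms).getD t 0
      = ms.getD t 0 + (((js.drop lo.toNat).countP (fun j => j == p - (t : Int))) : Int) := by
  intro lo ms
  induction lo, ms using pvEmit.induct js p with
  | case1 lo ms h ih =>
    intro h0 htl
    rw [pvEmit, dif_pos h]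
    obtain ⟨hlt, hle⟩ := h
    have hltn : lo.toNat < js.length := by omega
    have hget : PySem.List.pyGetD js lo 0 = js[lo.toNat] := by
      rw [PySem.List.pyGetD_of_nonneg js 0 h0, List.getD_eq_getElem _ _ hltn]
    have hi0 : 0 ≤ p - PySem.List.pyGetD js lo 0 := by rw [hget]; omega
    -- the updated ms
    have hms' :
        (PySem.List.pySetD ms (p - PySem.List.pyGetD js lo 0)
          (PySem.List.pyGetD ms (p - PySem.List.pyGetD js lo 0) 0 + 1))
        = ms.set (p - PySem.List.pyGetD js lo 0).toNat
            (ms.getD (p - PySem.List.pyGetD js lo 0).toNat 0 + 1) := by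
      rw [PySem.List.pySetD_of_nonneg _ _ hi0, PySem.List.pyGetD_of_nonneg _ 0 hi0]
    rw [ih (by omega) (by rw [PySem.List.length_pySetD]; exact htl)]
    rw [hms']
    have hdrop : js.drop lo.toNat = js[lo.toNat] :: js.drop (lo + 1).toNat := by
      rw [show (lo + 1).toNat = lo.toNat + 1 by omega]
      exact List.drop_eq_getElem_cons hltn
    rw [hdrop, List.countP_cons]
    by_cases hj : js[lo.toNat] = p - (t : Int)
    · -- increments exactly index t
      have hidx : (p - PySem.List.pyGetD js lo 0).toNat = t := by
        rw [hget, hj]; omega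
      rw [List.getD_eq_getElem?_getD, List.getElem?_set, hidx]

      rw [List.getD_eq_getElem?_getD]
      have : (js[lo.toNat] == p - (t : Int)) = true := by simpa using hj
      rw [this]
      simp only [Option.getD_some, if_pos htl, if_pos trivial]
      push_cast
      ring
    · have hidx : (p - PySem.List.pyGetD js lo 0).toNat ≠ t := by
        rw [hget]
        omega
      rw [List.getD_eq_getElem?_getD, List.getElem?_set, if_neg hidx,
        ← List.getD_eq_getElem?_getD]
      have : (js[lo.toNat] == p - (t : Int)) = false := by simpa using hj
      rw [this]
      push_cast
      ring
  | case2 lo ms h =>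
    intro h0 htl
    rw [pvEmit, dif_neg h]
    -- either lo past the end, or js[lo] > p: nothing in the suffix equals p - t
    have hzero : (js.drop lo.toNat).countP (fun j => j == p - (t : Int)) = 0 := by
      rw [List.countP_eq_zero]
      intro j hj
      simp only [beq_iff_eq]
      rcases Decidable.em (lo < (js.length : Int)) with hin | hout
      · have hltn : lo.toNat < js.length := by omega
        have hle : ¬ PySem.List.pyGetD js lo 0 ≤ p := fun hc => h ⟨hin, hc⟩
        have hgl : PySem.List.pyGetD js lo 0 = js[lo.toNat] := by
          rw [PySem.List.pyGetD_of_nonneg js 0 h0, List.getD_eq_getElem _ _ hltn]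
        have hhead : p < js[lo.toNat] := by rw [hgl] at hle; omega
        have hdrop : js.drop lo.toNat = js[lo.toNat] :: js.drop (lo.toNat + 1) :=
          List.drop_eq_getElem_cons hltn
        have hpw : (js.drop lo.toNat).Pairwise (· < ·) :=
          hs.sublist (List.drop_sublist _ _)
        rw [hdrop] at hj hpw
        have hrest := (List.pairwise_cons.mp hpw).1
        rcases List.mem_cons.mp hj with rfl | hjr
        · omega
        · have := hrest j hjr
          omega
      · have hnil : js.drop lo.toNat = [] := by
          apply List.drop_eq_nil_of_le
          omega
        rw [hnil] at hj
        simp at hj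
    rw [hzero]
    push_cast
    ring

-- the virus-position lists are strictly increasing
theorem pvPos_sorted (v : List Char) (c : Char) :
    ((pvPos v).getD c []).Pairwise (· < ·) := by
  rw [pvPos_getD]
  apply List.Pairwise.map
  · intro a b hab
    exact hab
  · exact (PySem.List.pairwise_lt_enumerate v 0).sublist List.filter_sublist

-- one data position p: bisect + emit adds the number of virus positions j with js j = p - t
theorem pvStepP (js : List Int) (p span : Int) (t : Nat) (ms : List Int)
    (hs : js.Pairwise (· < ·)) (htsp : (t : Int) < span) (htl : t < ms.length) :
    (pvEmit js p (pvBisect js (p - span) 0 (js.length : Int)) ms).getD t 0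
      = ms.getD t 0 + (js.countP (fun j => j == p - (t : Int)) : Int) := by
  obtain ⟨hr0, hrlen, hrpre, hrpost⟩ :=
    pvBisect_spec js (p - span) hs 0 (js.length : Int) le_rfl (by positivity) le_rfl
      (by intro q hq _; omega) (by intro q hq hql; omega)
  set r := pvBisect js (p - span) 0 (js.length : Int) with hr
  rw [pvEmit_getD js p t hs r ms hr0 htl]
  have htake : (js.take r.toNat).countP (fun j => j == p - (t : Int)) = 0 := by
    rw [List.countP_eq_zero]
    intro j hj
    rw [List.mem_iff_getElem] at hj
    obtain ⟨q, hq, hjq⟩ := hj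
    have hql : q < js.length := by
      have := List.length_take_le r.toNat js
      omega
    have hqr : (q : Int) < r := by
      rw [List.length_take] at hq
      omega
    have hle := hrpre q hqr hql
    rw [List.getD_eq_getElem _ _ hql] at hle
    rw [List.getElem_take] at hjq
    simp only [beq_iff_eq]
    omega
  have hfull : js.countP (fun j => j == p - (t : Int))
      = (js.take r.toNat).countP (fun j => j == p - (t : Int))
        + (js.drop r.toNat).countP (fun j => j == p - (t : Int)) := by
    rw [← List.countP_append, List.take_append_drop]
  rw [hfull, htake]
  push_cast
  ring

theorem pvCount_single (M t a : Nat) (q : Nat → Bool) :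
    (List.range M).countP (fun b => (a == t + b) && q b)
      = if t ≤ a ∧ a - t < M ∧ q (a - t) = true then 1 else 0 := by
  induction M with
  | zero =>
    rw [List.range_zero, List.countP_nil, if_neg]
    rintro ⟨_, h, _⟩; omega
  | succ M ih =>
    rw [List.range_succ, List.countP_append, ih, List.countP_cons, List.countP_nil]
    simp only [Bool.and_eq_true, beq_iff_eq, Nat.zero_add]
    split_ifs with h1 h2 h3 h2 h3 <;>
      first
        | rfl
        | omega
        | exact absurd ⟨h1.1, by omega, h1.2.2⟩ h2
        | (exfalso; rename_i hlast; first
            | (obtain ⟨e, hq⟩ := h3; subst e; exact hlast ⟨by omega, by omega, by simpa using hq⟩)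
            | (obtain ⟨x, y, z⟩ := hlast;
               by_cases hd : a - t < M
               · exact h1 ⟨x, hd, z⟩
               · exact h3 ⟨by omega, by rw [show M = a - t by omega]; exact z⟩))

theorem pvCountP_range_shift (n' m' t : Nat) (h : t + m' ≤ n') (Q : Nat → Bool) :
    (List.range n').countP (fun a => decide (t ≤ a ∧ a - t < m' ∧ Q (a - t) = true))
      = (List.range m').countP Q := by
  obtain ⟨r, hr⟩ : ∃ r, n' = t + m' + r := ⟨n' - (t + m'), by omega⟩
  subst hr
  rw [List.range_add, List.countP_append, List.range_add, List.countP_append,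
    List.countP_map, List.countP_map]
  have e1 : (List.range t).countP (fun a => decide (t ≤ a ∧ a - t < m' ∧ Q (a - t) = true)) = 0 := by
    rw [List.countP_eq_zero]
    intro a ha
    simp only [List.mem_range] at ha
    simp only [decide_eq_true_eq]
    rintro ⟨x, _, _⟩; omega
  have e2 : (List.range m').countP
      ((fun a => decide (t ≤ a ∧ a - t < m' ∧ Q (a - t) = true)) ∘ (t + ·))
      = (List.range m').countP Q := by
    apply List.countP_congr
    intro b hb
    simp only [List.mem_range] at hb
    simp only [Function.comp_apply, Nat.add_sub_cancel_left, decide_eq_true_eq]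
    by_cases hq : Q b
    · simp [hq]; omega
    · simp [hq]
  have e3 : (List.range r).countP
      ((fun a => decide (t ≤ a ∧ a - t < m' ∧ Q (a - t) = true)) ∘ (t + m' + ·)) = 0 := by
    rw [List.countP_eq_zero]
    intro a _
    simp only [Function.comp_apply, decide_eq_true_eq]
    rintro ⟨_, y, _⟩; omega
  rw [e1, e2, e3]
  omega

theorem pvFoldAdd_len (F : List Int → Int → List Int)
    (hFlen : ∀ ms x, (F ms x).length = ms.length) :
    ∀ (l : List Int) (ms : List Int), (l.foldl F ms).length = ms.length := by
  intro l
  induction l with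
  | nil => intro ms; rfl
  | cons x l ih => intro ms; rw [List.foldl_cons, ih, hFlen]

theorem pvFoldAdd (F : List Int → Int → List Int) (g : Int → Nat) (t : Nat)
    (hFlen : ∀ ms x, (F ms x).length = ms.length)
    (hFg : ∀ ms x, t < ms.length → (F ms x).getD t 0 = ms.getD t 0 + (g x : Int)) :
    ∀ (l : List Int) (ms : List Int), t < ms.length →
    (l.foldl F ms).getD t 0 = ms.getD t 0 + ((l.map g).sum : Int) := by
  intro l
  induction l with
  | nil => intro ms _; simp
  | cons x l ih =>
    intro ms htl
    rw [List.foldl_cons, ih _ (by rw [hFlen]; exact htl), hFg _ _ htl, List.map_cons,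
      List.sum_cons]
    push_cast
    ring

theorem pvKey (d v : List Char) (t : Nat) (a : Nat) (ha : a < d.length) :
    ((pvPos v).getD (PySem.List.pyGetD d (0 + (a : Int)) ' ') []).countP
        (fun j => j == (0 + (a : Int)) - (t : Int))
      = if (decide (t ≤ a ∧ a - t < v.length ∧
          (decide (d[t + (a - t)]? = v[(a - t)]?)) = true)) = true then 1 else 0 := by
  rw [pvPos_getD, List.countP_map, List.countP_filter,
    PySem.List.enumerate_eq_map_pyRange v ' ', PySem.List.pyRange_one, List.map_map,
    List.countP_map]
  have hlenv : (((PySem.List.len v) : Int) - 0).toNat = v.length := by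
    simp [PySem.List.len]
  rw [hlenv]
  rw [List.countP_congr
    (q := fun b : Nat => (a == t + b) && (decide (d[t + b]? = v[b]?))) ?_]
  · rw [pvCount_single]
    simp only [decide_eq_true_eq]
  · intro b hb
    simp only [List.mem_range] at hb
    simp only [Function.comp_apply, zero_add, PySem.List.pyGetD_natCast]
    by_cases hab : a = t + b
    · have h1 : (((b : Int)) == ((a : Int) - (t : Int)) : Bool) = true := by
        simp only [beq_iff_eq]; omega
      have h2 : ((a == t + b) : Bool) = true := by simp [hab]
      rw [h1, h2, Bool.true_and, Bool.true_and]
      have hbv : b < v.length := hb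
      have had : a < d.length := ha
      have htb : t + b < d.length := by omega
      rw [List.getD_eq_getElem v ' ' hbv, List.getD_eq_getElem d ' ' had]
      rw [List.getElem?_eq_getElem htb, List.getElem?_eq_getElem hbv]
      have : d[t + b] = d[a] := by congr 1; omega
      rw [this]
      by_cases hc : (d[a]'had) = (v[b]'hbv)
      · simp [hc]
      · simp [hc, Ne.symm hc]
    · have h1 : (((b : Int)) == ((a : Int) - (t : Int)) : Bool) = false := by
        simp only [beq_eq_false_iff_ne, ne_eq]; omega
      have h2 : ((a == t + b) : Bool) = false := by simp [hab]
      rw [h1, h2, Bool.false_and, Bool.false_and]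

theorem pvSum_counts (d v : List Char) (t : Nat) (ht : t + v.length ≤ d.length) :
    ((PySem.List.pyRange 0 (d.length : Int) 1).map
        (fun p => (((pvPos v).getD (PySem.List.pyGetD d p ' ') []).countP
          (fun j => j == p - (t : Int))))).sum = pvMCnt d v t := by
  rw [PySem.List.pyRange_one, List.map_map]
  have hlend : (((d.length : Int)) - 0).toNat = d.length := by omega
  rw [hlend]
  trans (List.map (fun a : Nat => if (decide (t ≤ a ∧ a - t < v.length ∧
      (decide (d[t + (a - t)]? = v[(a - t)]?)) = true)) = true then (1 : Nat) else 0)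
    (List.range d.length)).sum
  · exact congrArg List.sum (List.map_congr_left
      (fun a ha => pvKey d v t a (List.mem_range.mp ha)))
  · rw [PySem.List.sum_map_ite_one_zero_nat]
    exact pvCountP_range_shift d.length v.length t ht (fun b => decide (d[t + b]? = v[b]?))


theorem pvMism_mcnt (d v : List Char) (t : Nat) (ht : t + v.length ≤ d.length) :
    (pvMism (d.drop t) v : Int) = (v.length : Int) - (pvMCnt d v t : Int) := by
  have h1 : pvMism (d.drop t) v
      = (List.range v.length).countP (fun j => decide ((d.drop t)[j]? ≠ v[j]?)) :=
    pvMism_eq_countP_range v (d.drop t) (by simp [List.length_drop]; omega)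
  have h2 := List.length_eq_countP_add_countP (l := List.range v.length)
    (fun j => decide (d[t + j]? = v[j]?))
  have h3 : (List.range v.length).countP (fun j => decide ((d.drop t)[j]? ≠ v[j]?))
      = (List.range v.length).countP
          (fun a => decide (¬ decide (d[t + a]? = v[a]?) = true)) := by
    apply List.countP_congr
    intro j _
    simp [List.getElem?_drop]
  rw [h1, h3]
  simp only [List.length_range] at h2
  unfold pvMCnt
  omega

theorem alt_eq_count (data virus : String) (k : Int) :
    solution_alt data virus k =
      (((List.range ((data.toList.length : Int) - (virus.toList.length : Int) + 1).toNat).countP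
        (fun c => decide ((pvMism (data.toList.drop c) virus.toList : Int) ≤ k))) : Int) := by
  simp only [solution_alt]
  set d := data.toList with hd
  set v := virus.toList with hv
  set span : Int := (d.length : Int) - (v.length : Int) + 1 with hspan
  by_cases hle : span ≤ 0
  · rw [if_pos hle]
    rw [Int.toNat_of_nonpos hle, List.range_zero, List.countP_nil]
    rfl
  · rw [if_neg hle]
    rw [PySem.List.foldl_ite_add_one, zero_add]
    have hFlen : ∀ (ms : List Int) (p : Int),
        (pvEmit ((pvPos v).getD (PySem.List.pyGetD d p ' ') []) p
          (pvBisect ((pvPos v).getD (PySem.List.pyGetD d p ' ') []) (p - span) 0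
            (((pvPos v).getD (PySem.List.pyGetD d p ' ') []).length : Int)) ms).length
          = ms.length := by
      intro ms p
      exact pvEmit_length _ _ _ _
    have hms : (PySem.List.pyRange 0 (d.length : Int) 1).foldl
          (fun ms p =>
            pvEmit ((pvPos v).getD (PySem.List.pyGetD d p ' ') []) p
              (pvBisect ((pvPos v).getD (PySem.List.pyGetD d p ' ') []) (p - span) 0
                (((pvPos v).getD (PySem.List.pyGetD d p ' ') []).length : Int)) ms)
          (List.replicate span.toNat (0 : Int))
        = (List.range span.toNat).map (fun t => (pvMCnt d v t : Int)) := by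
      apply List.ext_getElem
      · rw [pvFoldAdd_len _ hFlen]
        simp
      · intro i h1 h2
        rw [pvFoldAdd_len _ hFlen, List.length_replicate] at h1
        have hisp : (i : Int) < span := by omega
        have hvd : i + v.length ≤ d.length := by omega
        rw [← List.getD_eq_getElem _ 0 (by rw [pvFoldAdd_len _ hFlen, List.length_replicate]; exact h1)]
        rw [pvFoldAdd _
          (fun p => (((pvPos v).getD (PySem.List.pyGetD d p ' ') []).countP
            (fun j => j == p - (i : Int)))) i hFlen
          (fun ms p htl => pvStepP _ p span i ms (pvPos_sorted v _) hisp htl)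
          _ _ (by rw [List.length_replicate]; exact h1)]
        rw [pvSum_counts d v i hvd]
        simp [List.getD_eq_getElem?_getD, h1]
    rw [hms, List.countP_map]
    congr 1
    apply List.countP_congr
    intro t htm
    simp only [List.mem_range] at htm
    have hvd : t + v.length ≤ d.length := by omega
    simp only [Function.comp_apply]
    rw [pvMism_mcnt d v t hvd]

-- ===== VERDICT (by name: the statement is the Claim_ definition above) =====
theorem solution_spec : Claim_equal_solution := by
  intro data virus k _
  unfold Spec_solution
  rw [solution_eq_count, alt_eq_count]
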